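-- pv_equiv track=rewrite | github.com/daniel-reich/ubiquitous-fiesta | 6brSyFwWnb9Msu7kX_23.py | pos_neg_sort
-- ===== SOURCE A (Python) =====
-- def pos_neg_sort(x):
--   neg = [a for a in x if a<0]
--   pos = [a for a in x if a>0]
--   pos.sort()
--   negidx = []
--   c=-1
--   for a in x:
--     c+=1
--     if a<0:
--       negidx.append(c)
--   for a, b in zip(neg,negidx):
--     pos.insert(b,a)
--   return pos
-- ===== SOURCE B (Python) =====
-- def pos_neg_sort(x):
--     pos = sorted(a for a in x if a > 0)
--     P = len(pos)
--     # final slot of the k-th negative (original index i) is min(i, P + k):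
--     # list.insert clamps, and later insertions never shift earlier ones.
--     pairs = []
--     k = 0
--     for i, a in enumerate(x):
--         if a < 0:
--             pairs.append((min(i, P + k), a))
--             k += 1
--     res = []
--     pi = 0
--     for p, a in pairs:
--         while len(res) < p:
--             res.append(pos[pi])
--             pi += 1
--         res.append(a)
--     res.extend(pos[pi:])
--     return res
-- ===== Notes on version B (the rewrite author's own statement) =====
-- stated objective: faster
-- what changed: Replaces the loop of list.insert calls (each an O(n) shift) by computing every negative's final slot min(i, P+k) up front and building the result in one left-to-right merge of the sorted positives with those slots.
import Mathlib
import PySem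

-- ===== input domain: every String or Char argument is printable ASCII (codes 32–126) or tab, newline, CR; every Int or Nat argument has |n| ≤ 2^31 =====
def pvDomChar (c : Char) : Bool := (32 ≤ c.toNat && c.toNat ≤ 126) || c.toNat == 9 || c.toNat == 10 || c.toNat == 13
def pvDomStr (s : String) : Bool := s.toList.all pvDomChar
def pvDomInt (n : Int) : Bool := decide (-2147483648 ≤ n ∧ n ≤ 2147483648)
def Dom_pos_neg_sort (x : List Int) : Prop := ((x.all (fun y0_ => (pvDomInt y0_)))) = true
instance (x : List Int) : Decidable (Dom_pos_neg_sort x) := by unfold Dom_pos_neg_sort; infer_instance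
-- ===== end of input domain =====

-- B computes each negative's final slot min(i, P+k) up front and builds the result
-- in one merge pass, replacing A's quadratic loop of list.insert shifts (objective: faster).


-- ===== PORT A =====
def pos_neg_sort (x : List Int) : List Int :=
  let neg := x.filter (fun a => decide (a < 0))
  let pos := PySem.List.sorted (x.filter (fun a => decide (a > 0))) (fun v => v) false
  -- c = -1; for a in x: c += 1; if a < 0: negidx.append(c)
  let negidx := (x.foldl (fun (s : Int × List Int) a =>
      let c := s.1 + 1
      (c, if a < 0 then s.2 ++ [c] else s.2)) (-1, ([] : List Int))).2
  (neg.zip negidx).foldl (fun l p => PySem.List.insert l p.2 p.1) pos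

-- ===== PORT B =====
-- for p, a in pairs: while len(res) < p: res.append(pos[pi]); pi += 1 ; res.append(a)  -- then res.extend(pos[pi:])
-- (j plays len(res); the pos = [] fill branch is unreachable on B's own pairs, mirroring pos[pi])
def pvPlace : List (Int × Int) → List Int → Int → List Int
  | [], pos, _ => pos
  | (p, a) :: rest, pos, j =>
      if j < p then
        match pos with
        | q :: pos' => q :: pvPlace ((p, a) :: rest) pos' (j + 1)
        | [] => a :: pvPlace rest [] (j + 1)
      else
        a :: pvPlace rest pos (j + 1)
  termination_by pairs pos _ => pairs.length + pos.length

def pos_neg_sort_alt (x : List Int) : List Int :=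
  let pos := PySem.List.sorted (x.filter (fun a => decide (a > 0))) (fun v => v) false
  let P : Int := pos.length
  let pairs := ((PySem.List.enumerate x 0).foldl
      (fun (s : Int × List (Int × Int)) ia =>
        if ia.2 < 0 then (s.1 + 1, s.2 ++ [(min ia.1 (P + s.1), ia.2)]) else s)
      (0, ([] : List (Int × Int)))).2
  pvPlace pairs pos 0

-- ===== PRECONDITION & SPEC =====
def Spec_pos_neg_sort (x : List Int) (out : List Int) : Prop := out = pos_neg_sort_alt x
instance (x : List Int) (out : List Int) : Decidable (Spec_pos_neg_sort x out) := by unfold Spec_pos_neg_sort; infer_instance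

-- ===== CLAIM (what is proved, stated in full; the proofs are below) =====
def Claim_equal_pos_neg_sort : Prop := ∀ (x : List Int), Dom_pos_neg_sort x → Spec_pos_neg_sort x (pos_neg_sort x)

-- ===== LEMMAS AND PROOFS =====

-- the negatives of x with their original indices
def pvE (x : List Int) (s : Int) : List (Int × Int) :=
  (PySem.List.enumerate x s).filter (fun p => decide (p.2 < 0))

-- B's slots: (min i (P+k), a) for the k-th pair (i, a)
def pvMins (P : Int) : List (Int × Int) → Int → List (Int × Int)
  | [], _ => []
  | (i, a) :: t, k => (min i (P + k), a) :: pvMins P t (k + 1)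

theorem pvMins_shift (P : Int) (t : List (Int × Int)) (k : Int) :
    pvMins P t (k + 1) = pvMins (P + 1) t k := by
  induction t generalizing k with
  | nil => rfl
  | cons h t ih =>
      obtain ⟨i, a⟩ := h
      simp only [pvMins]
      have h1 : P + (k + 1) = P + 1 + k := by ring
      rw [h1, ih (k + 1)]

theorem pvMins_mem_gt (P i : Int) (t : List (Int × Int)) (k : Int) (hk : 1 ≤ k)
    (ht : ∀ p ∈ t, i < p.1) : ∀ q ∈ pvMins P t k, min i P < q.1 := by
  induction t generalizing k with
  | nil => intro q hq; simp [pvMins] at hq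
  | cons h t ih =>
      obtain ⟨i', a'⟩ := h
      intro q hq
      simp only [pvMins, List.mem_cons] at hq
      rcases hq with rfl | hq
      · have h1 : i < i' := ht (i', a') (by simp)
        simp only [lt_min_iff, min_lt_iff]
        omega
      · exact ih (k + 1) (by omega) (fun p hp => ht p (List.mem_cons_of_mem _ hp)) q hq

-- python list.insert with a nonnegative index clamps it to the length
theorem pvInsert_clamp (l : List Int) (i a : Int) (h : 0 ≤ i) :
    PySem.List.insert l i a
      = l.take (min i (l.length : Int)).toNat ++ a :: l.drop (min i (l.length : Int)).toNat := by
  simp only [PySem.List.insert, PySem.List.sliceIndices]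
  have hni : ¬ i < 0 := by omega
  norm_num [hni]

-- key commutation: placing the head pair equals inserting it first
theorem pvPlace_insert (a : Int) : ∀ (l : List Int) (j m : Int) (ps : List (Int × Int)),
    j ≤ m → m - j ≤ l.length → (∀ q ∈ ps, m < q.1) →
    pvPlace ((m, a) :: ps) l j
      = pvPlace ps (l.take (m - j).toNat ++ a :: l.drop (m - j).toNat) j := by
  intro l
  induction l with
  | nil =>
      intro j m ps hjm hlen hps
      have hj : j = m := by simp at hlen; omega
      subst hj
      simp only [List.take_nil, List.drop_nil, List.nil_append]
      rw [pvPlace]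
      simp only [lt_irrefl, if_false]
      cases ps with
      | nil => simp [pvPlace]
      | cons q t =>
          obtain ⟨p1, a1⟩ := q
          rw [pvPlace, pvPlace]
          have : j < p1 := hps (p1, a1) (by simp)
          simp [this]
  | cons q l' ih =>
      intro j m ps hjm hlen hps
      by_cases hj : j = m
      · subst hj
        have hz : (j - j).toNat = 0 := by omega
        rw [hz]
        simp only [List.take_zero, List.drop_zero, List.nil_append]
        rw [pvPlace]
        simp only [lt_irrefl, if_false]
        cases ps with
        | nil => simp [pvPlace]
        | cons q1 t =>
            obtain ⟨p1, a1⟩ := q1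
            conv_rhs => rw [pvPlace]
            have : j < p1 := hps (p1, a1) (by simp)
            simp [this]
      · have hjm' : j < m := lt_of_le_of_ne hjm hj
        have hlt : (m - j).toNat = (m - (j + 1)).toNat + 1 := by omega
        rw [pvPlace]
        simp only [hjm', if_true]
        rw [ih (j + 1) m ps (by omega) (by simp at hlen ⊢; omega) hps]
        rw [hlt]
        simp only [List.take_succ_cons, List.drop_succ_cons, List.cons_append]
        cases ps with
        | nil => simp [pvPlace]
        | cons q1 t =>
            obtain ⟨p1, a1⟩ := q1
            conv_rhs => rw [pvPlace]
            have : j < p1 := lt_trans hjm' (hps (p1, a1) (by simp))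
            simp [this]

-- main bridge: A's fold of inserts = B's pvPlace on the precomputed slots
theorem pvFold_eq_place : ∀ (zs : List (Int × Int)) (l : List Int),
    zs.Pairwise (fun p q => p.1 < q.1) → (∀ p ∈ zs, 0 ≤ p.1) →
    (zs.map (fun p => (p.2, p.1))).foldl (fun L q => PySem.List.insert L q.2 q.1) l
      = pvPlace (pvMins (l.length : Int) zs 0) l 0 := by
  intro zs
  induction zs with
  | nil => intro l _ _; simp [pvMins, pvPlace]
  | cons h t ih =>
      obtain ⟨i, a⟩ := h
      intro l hpw hnn
      have hi : 0 ≤ i := hnn (i, a) (by simp)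
      have ht : ∀ p ∈ t, i < p.1 := by
        intro p hp
        exact (List.pairwise_cons.mp hpw).1 p hp
      simp only [List.map_cons, List.foldl_cons]
      rw [pvInsert_clamp l i a hi]
      rw [ih _ ((List.pairwise_cons.mp hpw).2) (fun p hp => hnn p (List.mem_cons_of_mem _ hp))]
      have hlen2 : pvMins ((List.take (min i (l.length : Int)).toNat l
            ++ a :: List.drop (min i (l.length : Int)).toNat l).length : Int) t 0
          = pvMins (l.length : Int) t 1 := by
        have h1 : ((List.take (min i (l.length : Int)).toNat l
            ++ a :: List.drop (min i (l.length : Int)).toNat l).length : Int)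
            = (l.length : Int) + 1 := by simp
        rw [h1, ← pvMins_shift]
        norm_num
      rw [hlen2]
      simp only [pvMins, zero_add, add_zero]
      rw [pvPlace_insert a l 0 (min i (l.length : Int)) (pvMins (l.length : Int) t 1)
        (by omega) (by omega)
        (pvMins_mem_gt (l.length : Int) i t 1 le_rfl ht)]
      simp

-- A's pieces in terms of pvE
theorem pvNeg_eq (x : List Int) : ∀ s : Int,
    (pvE x s).map (fun p => p.2) = x.filter (fun a => decide (a < 0)) := by
  induction x with
  | nil => intro s; rfl
  | cons a t ih =>
      intro s
      simp only [pvE, PySem.List.enumerate_cons] at *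
      by_cases h : a < 0 <;> simp [h, ih (s + 1)]

theorem pvNegidx_eq (x : List Int) : ∀ (s : Int) (acc : List Int),
    (x.foldl (fun (st : Int × List Int) a =>
        let c := st.1 + 1
        (c, if a < 0 then st.2 ++ [c] else st.2)) (s - 1, acc)).2
      = acc ++ (pvE x s).map (fun p => p.1) := by
  induction x with
  | nil => intro s acc; simp [pvE]
  | cons a t ih =>
      intro s acc
      simp only [List.foldl_cons, pvE, PySem.List.enumerate_cons]
      have h2 : s + 1 - 1 = s := by ring
      by_cases h : a < 0
      · have := ih (s + 1) (acc ++ [s])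
        rw [h2] at this
        simp [h, this, pvE]
      · have := ih (s + 1) acc
        rw [h2] at this
        simp [h, this, pvE]

theorem pvPairs_eq (P : Int) (x : List Int) : ∀ (s k : Int) (acc : List (Int × Int)),
    ((PySem.List.enumerate x s).foldl
        (fun (st : Int × List (Int × Int)) ia =>
          if ia.2 < 0 then (st.1 + 1, st.2 ++ [(min ia.1 (P + st.1), ia.2)]) else st)
        (k, acc)).2
      = acc ++ pvMins P (pvE x s) k := by
  induction x with
  | nil => intro s k acc; simp [pvE, pvMins, PySem.List.enumerate_nil]
  | cons a t ih =>
      intro s k acc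
      simp only [PySem.List.enumerate_cons, List.foldl_cons, pvE, List.filter_cons]
      by_cases h : a < 0
      · simp only [h, decide_true, if_true]
        have := ih (s + 1) (k + 1) (acc ++ [(min s (P + k), a)])
        simp only [pvE] at this
        simp [this, pvMins]
      · simp only [h, decide_false, if_false]
        have := ih (s + 1) k acc
        simp only [pvE] at this
        simp [this]

theorem pvE_pairwise (x : List Int) (s : Int) :
    (pvE x s).Pairwise (fun p q => p.1 < q.1) :=
  (PySem.List.pairwise_lt_enumerate x s).filter _

theorem pvE_nonneg (x : List Int) : ∀ (s : Int), 0 ≤ s → ∀ p ∈ pvE x s, 0 ≤ p.1 := by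
  induction x with
  | nil => intro s _ p hp; simp [pvE] at hp
  | cons a t ih =>
      intro s hs p hp
      by_cases h : a < 0
      · simp [pvE, PySem.List.enumerate_cons, h] at hp
        rcases hp with rfl | hp
        · exact hs
        · exact ih (s + 1) (by omega) p (by simpa [pvE] using hp)
      · simp [pvE, PySem.List.enumerate_cons, h] at hp
        exact ih (s + 1) (by omega) p (by simpa [pvE] using hp)

theorem pvZip_eq (x : List Int) :
    ((x.filter (fun a => decide (a < 0))).zip ((pvE x 0).map (fun p => p.1)))
      = (pvE x 0).map (fun p => (p.2, p.1)) := by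
  rw [← pvNeg_eq x 0, List.zip_map']

-- ===== VERDICT (by name: the statement is the Claim_ definition above) =====
theorem pos_neg_sort_spec : Claim_equal_pos_neg_sort := by
  intro x _
  unfold Spec_pos_neg_sort pos_neg_sort pos_neg_sort_alt
  simp only []
  rw [show ((-1 : Int), ([] : List Int)) = (0 - 1, ([] : List Int)) by norm_num]
  rw [pvNegidx_eq x 0 [], List.nil_append, pvZip_eq x]
  rw [pvPairs_eq _ x 0 0 [], List.nil_append]
  rw [pvFold_eq_place (pvE x 0) _ (pvE_pairwise x 0) (pvE_nonneg x 0 le_rfl)]
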